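-- pv_equiv track=rewrite | github.com/albinbenny99/zennode-tasks | program1.py | apply_discount_rule
-- ===== SOURCE A (Python) =====
-- def apply_discount_rule(cart_total, cart_quantity):
--     discount_rules = {
--         "flat_10_discount": (cart_total > 200, 10),
--         "bulk_5_discount": (any(cart_quantity[name] > 10 for name in cart_quantity), 5),
--         "bulk_10_discount": (sum(cart_quantity.values()) > 20, 10),
--         "tiered_50_discount": (sum(cart_quantity.values()) > 30 and any(cart_quantity[name] > 15 for name in cart_quantity), 50)
--     }
--
--     applicable_discounts = {rule: discount for rule, (is_applicable, discount) in discount_rules.items() if is_applicable}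
--     if not applicable_discounts:
--         return None, 0
--
--     max_discount_rule = max(applicable_discounts, key=applicable_discounts.get)
--     return max_discount_rule, applicable_discounts[max_discount_rule]
-- ===== SOURCE B (Python) =====
-- def apply_discount_rule(cart_total, cart_quantity):
--     total_qty = sum(cart_quantity.values())
--     if total_qty > 30 and any(q > 15 for q in cart_quantity.values()):
--         return "tiered_50_discount", 50
--     if cart_total > 200:
--         return "flat_10_discount", 10
--     if total_qty > 20:
--         return "bulk_10_discount", 10
--     if any(q > 10 for q in cart_quantity.values()):
--         return "bulk_5_discount", 5
--     return None, 0
-- ===== Notes on version B (the rewrite author's own statement) =====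
-- stated objective: simpler
-- what changed: Replaced the dict of (condition, discount) rules, the applicable-rule dict comprehension and the max(key=...) scan by a direct early-return cascade that tests the rules in descending discount order (tiered_50, then flat_10 before bulk_10 to keep the insertion-order tie-break, then bulk_5).
import Mathlib
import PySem

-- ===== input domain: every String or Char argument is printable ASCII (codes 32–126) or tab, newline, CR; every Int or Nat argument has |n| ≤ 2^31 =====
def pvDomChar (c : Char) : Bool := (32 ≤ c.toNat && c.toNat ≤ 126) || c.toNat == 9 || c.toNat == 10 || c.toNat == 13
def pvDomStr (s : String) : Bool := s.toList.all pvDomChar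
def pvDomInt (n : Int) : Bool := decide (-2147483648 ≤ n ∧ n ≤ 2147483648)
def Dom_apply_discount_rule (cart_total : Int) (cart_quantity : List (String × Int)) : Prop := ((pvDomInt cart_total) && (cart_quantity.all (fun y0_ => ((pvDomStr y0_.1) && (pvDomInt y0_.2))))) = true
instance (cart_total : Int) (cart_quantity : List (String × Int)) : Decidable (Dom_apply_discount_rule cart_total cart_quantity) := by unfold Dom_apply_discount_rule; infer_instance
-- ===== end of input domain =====

-- B: early-return cascade over the same four rule conditions in descending discount-priority order, replacing A's dict building + max(key=...) scan (objective: simpler).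


-- ===== PORT A =====
-- Port of A: build the rule table, filter the applicable rules, then max(key=get)
-- (Python's max returns the FIRST key with maximal value; ported as a foldl keeping
-- the earlier element on ties — exact for this semantics).
def apply_discount_rule (cart_total : Int) (cart_quantity : List (String × Int)) : Option String × Int :=
  let vals := cart_quantity.map Prod.snd
  let discount_rules : List (String × (Bool × Int)) :=
    [("flat_10_discount", (decide (200 < cart_total), 10)),
     ("bulk_5_discount", (vals.any (fun v => decide (10 < v)), 5)),
     ("bulk_10_discount", (decide (20 < vals.sum), 10)),
     ("tiered_50_discount", (decide (30 < vals.sum) && vals.any (fun v => decide (15 < v)), 50))]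
  let applicable := discount_rules.filterMap (fun p => if p.2.1 then some (p.1, p.2.2) else none)
  match applicable with
  | [] => (none, 0)
  | h :: t =>
    let m := t.foldl (fun best q => if best.2 < q.2 then q else best) h
    (some m.1, m.2)

-- ===== PORT B =====
-- Port of B: early-return cascade in descending discount-priority order.
def apply_discount_rule_alt (cart_total : Int) (cart_quantity : List (String × Int)) : Option String × Int :=
  let total_qty := (cart_quantity.map Prod.snd).sum
  if 30 < total_qty ∧ (cart_quantity.map Prod.snd).any (fun q => decide (15 < q)) then
    (some "tiered_50_discount", 50)
  else if 200 < cart_total then (some "flat_10_discount", 10)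
  else if 20 < total_qty then (some "bulk_10_discount", 10)
  else if (cart_quantity.map Prod.snd).any (fun q => decide (10 < q)) then
    (some "bulk_5_discount", 5)
  else (none, 0)

-- ===== PRECONDITION & SPEC =====
def Spec_apply_discount_rule (cart_total : Int) (cart_quantity : List (String × Int)) (out : Option String × Int) : Prop := out = apply_discount_rule_alt cart_total cart_quantity
instance (cart_total : Int) (cart_quantity : List (String × Int)) (out : Option String × Int) : Decidable (Spec_apply_discount_rule cart_total cart_quantity out) := by unfold Spec_apply_discount_rule; infer_instance

-- ===== CLAIM (what is proved, stated in full; the proofs are below) =====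
def Claim_equal_apply_discount_rule : Prop := ∀ (cart_total : Int) (cart_quantity : List (String × Int)), Dom_apply_discount_rule cart_total cart_quantity → Spec_apply_discount_rule cart_total cart_quantity (apply_discount_rule cart_total cart_quantity)

-- ===== LEMMAS AND PROOFS =====

-- ===== VERDICT (by name: the statement is the Claim_ definition above) =====
theorem apply_discount_rule_spec : Claim_equal_apply_discount_rule := by
  intro cart_total cart_quantity _
  unfold Spec_apply_discount_rule apply_discount_rule apply_discount_rule_alt
  by_cases h1 : 200 < cart_total <;>
  by_cases h2 : (cart_quantity.map Prod.snd).any (fun v => decide (10 < v)) = true <;>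
  by_cases h3 : 20 < (cart_quantity.map Prod.snd).sum <;>
  by_cases h4 : 30 < (cart_quantity.map Prod.snd).sum <;>
  by_cases h5 : (cart_quantity.map Prod.snd).any (fun v => decide (15 < v)) = true <;>
  simp only [h1, h2, h3, h4, h5, decide_true, decide_false, List.filterMap,
    if_true, if_false, Bool.and_true, Bool.and_false, List.foldl] <;>
  simp_all
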